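-- pv_equiv track=rewrite | github.com/francescodiana99/fedkit-learn | scripts/utils.py | swap_dict_levels
-- ===== SOURCE A (Python) =====
-- def swap_dict_levels(nested_dict):
--     """
--     Swap the levels of keys in a nested dictionary.
--
--     Parameters:
--     - nested_dict (dict): The nested dictionary where the first level represents outer keys
--                          and the second level represents inner keys.
--
--     Returns:
--     - dict: A new dictionary with swapped levels, where the first level represents inner keys
--             and the second level represents outer keys.
--     """
--     swapped_dict = {}
--
--     for outer_key, inner_dict in nested_dict.items():
--         for inner_key, data in inner_dict.items():
--             if inner_key not in swapped_dict:
--                 swapped_dict[inner_key] = {}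
--             swapped_dict[inner_key][outer_key] = data
--
--     return swapped_dict
-- ===== SOURCE B (Python) =====
-- def swap_dict_levels(nested_dict):
--     inner_keys = dict.fromkeys(k for d in nested_dict.values() for k in d)
--     return {
--         ik: {ok: d[ik] for ok, d in nested_dict.items() if ik in d}
--         for ik in inner_keys
--     }
-- ===== Notes on version B (the rewrite author's own statement) =====
-- stated objective: simpler
-- what changed: A populates the swapped dict in one mutating pass; B first gathers the distinct inner keys in first-appearance order, then builds the result as a nested comprehension that for each inner key scans all outer items and keeps those whose inner dict contains it.
import Mathlib
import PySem

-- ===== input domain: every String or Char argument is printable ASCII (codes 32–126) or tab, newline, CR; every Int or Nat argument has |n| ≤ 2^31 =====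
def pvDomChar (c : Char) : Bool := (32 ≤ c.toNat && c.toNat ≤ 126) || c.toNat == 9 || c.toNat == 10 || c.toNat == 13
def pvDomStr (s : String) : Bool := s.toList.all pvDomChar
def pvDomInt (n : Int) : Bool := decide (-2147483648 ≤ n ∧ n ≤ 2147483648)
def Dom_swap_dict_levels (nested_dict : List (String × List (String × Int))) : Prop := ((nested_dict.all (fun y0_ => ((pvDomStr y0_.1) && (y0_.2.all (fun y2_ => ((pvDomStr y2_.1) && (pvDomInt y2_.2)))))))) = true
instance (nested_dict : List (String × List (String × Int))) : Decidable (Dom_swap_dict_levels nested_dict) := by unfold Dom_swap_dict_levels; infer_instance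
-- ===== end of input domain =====

-- B gathers the distinct inner keys first and then builds the swapped dict by a nested
-- comprehension over the outer items, instead of A's single mutating accumulation pass.

-- ===== PORT A =====
-- body of A's inner 'for inner_key, data in inner_dict.items()' loop (ok = current outer key)
def pvInnerStep (ok : String) (sw : PySem.Dict String (PySem.Dict String Int))
    (q : String × Int) : PySem.Dict String (PySem.Dict String Int) :=
  -- if inner_key not in swapped_dict: swapped_dict[inner_key] = {}
  let sw := if !(sw.contains q.1) then sw.insert q.1 PySem.Dict.empty else sw
  -- swapped_dict[inner_key][outer_key] = data
  sw.modify q.1 PySem.Dict.empty (fun d => d.insert ok q.2)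

def swap_dict_levels (nested_dict : List (String × List (String × Int))) : List (String × List (String × Int)) :=
  let sw : PySem.Dict String (PySem.Dict String Int) :=
    nested_dict.foldl (fun sw p => p.2.foldl (pvInnerStep p.1) sw) PySem.Dict.empty
  sw.items.map (fun r => (r.1, r.2.items))

-- ===== PORT B =====
def swap_dict_levels_alt (nested_dict : List (String × List (String × Int))) : List (String × List (String × Int)) :=
  -- inner_keys = dict.fromkeys(k for d in nested_dict.values() for k in d)
  let innerKeys := PySem.List.dedup (nested_dict.flatMap (fun p => p.2.map Prod.fst))
  -- {ik: {ok: d[ik] for ok, d in nested_dict.items() if ik in d} for ik in inner_keys}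
  innerKeys.map (fun ik =>
    (ik, nested_dict.filterMap (fun p => ((PySem.Dict.mk p.2).get? ik).map (fun v => (p.1, v)))))

-- ===== PRECONDITION & SPEC =====
-- Pre_ admits exactly the association lists that encode a Python nested dict (no duplicate outer
-- keys, no duplicate keys inside an inner dict); duplicate-key lists do not arise from any Python
-- input of A, so Pre_ excludes no input on which the Python A returns.
def Pre_swap_dict_levels (nested_dict : List (String × List (String × Int))) : Prop :=
  (nested_dict.map Prod.fst).Nodup ∧ ∀ p ∈ nested_dict, (p.2.map Prod.fst).Nodup
instance (nested_dict : List (String × List (String × Int))) : Decidable (Pre_swap_dict_levels nested_dict) := by unfold Pre_swap_dict_levels; infer_instance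

def pvWitness_swap_dict_levels : (List (String × List (String × Int))) :=
  [("a", [("x", 1), ("y", 2)]), ("b", [("x", 3)])]

def Spec_swap_dict_levels (nested_dict : List (String × List (String × Int))) (out : List (String × List (String × Int))) : Prop := out = swap_dict_levels_alt nested_dict
instance (nested_dict : List (String × List (String × Int))) (out : List (String × List (String × Int))) : Decidable (Spec_swap_dict_levels nested_dict out) := by unfold Spec_swap_dict_levels; infer_instance

-- ===== CLAIM (what is proved, stated in full; the proofs are below) =====
def Claim_equal_swap_dict_levels : Prop := ∀ (nested_dict : List (String × List (String × Int))), Dom_swap_dict_levels nested_dict → Pre_swap_dict_levels nested_dict → Spec_swap_dict_levels nested_dict (swap_dict_levels nested_dict)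

-- ===== LEMMAS AND PROOFS =====

-- the second column of B's result for one inner key
def pvCollect (nd : List (String × List (String × Int))) (ik : String) : List (String × Int) :=
  nd.filterMap (fun p => ((PySem.Dict.mk p.2).get? ik).map (fun v => (p.1, v)))

def pvFlatKeys (nd : List (String × List (String × Int))) : List String :=
  nd.flatMap (fun p => p.2.map Prod.fst)

-- B's result, as the accumulator dict A maintains
def pvAcc (nd : List (String × List (String × Int))) : PySem.Dict String (PySem.Dict String Int) :=
  PySem.Dict.mk ((PySem.List.dedup (pvFlatKeys nd)).map (fun ik => (ik, PySem.Dict.mk (pvCollect nd ik))))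

lemma get?_eq_of_mem_nodup {ν : Type} (d : PySem.Dict String ν) (q : String × ν)
    (hmem : q ∈ d.items) (hnd : (d.items.map Prod.fst).Nodup) :
    d.get? q.1 = some q.2 := by
  obtain ⟨l⟩ := d
  induction l with
  | nil => cases hmem
  | cons a rest ih =>
    simp only [List.map_cons, List.nodup_cons] at hnd
    simp only [PySem.Dict.get?, List.find?_cons]
    rcases List.mem_cons.mp hmem with h | h
    · subst h; simp
    · have hne : ¬ (a.1 == q.1) = true := by
        simp only [beq_iff_eq]
        intro he
        exact hnd.1 (he ▸ List.mem_map_of_mem h)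
      simp only [hne]
      simpa [PySem.Dict.get?] using ih h hnd.2

lemma insert_items_of_contains {ν : Type} (d : PySem.Dict String ν) (k : String) (v : ν)
    (h : d.contains k = true) :
    (d.insert k v).items = d.items.map (fun r => if r.1 = k then (k, v) else r) := by
  simp only [PySem.Dict.insert, h, if_true]
  refine List.map_congr_left (fun r _ => ?_)
  by_cases hr : r.1 = k <;> simp [hr]

lemma insert_items_of_not_contains {ν : Type} (d : PySem.Dict String ν) (k : String) (v : ν)
    (h : d.contains k = false) :
    (d.insert k v).items = d.items ++ [(k, v)] := by
  simp [PySem.Dict.insert, h]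

lemma contains_iff_mem {ν : Type} (d : PySem.Dict String ν) (k : String) :
    d.contains k = true ↔ k ∈ d.items.map Prod.fst := by
  simp [PySem.Dict.contains, List.any_eq_true, List.mem_map]

lemma dedup_append (l2 l1 : List String) (h : l2.Nodup) :
    PySem.List.dedup (l1 ++ l2) =
      PySem.List.dedup l1 ++ l2.filter (fun a => decide (a ∉ l1)) := by
  induction l2 generalizing l1 with
  | nil => simp
  | cons a rest ih =>
    simp only [List.nodup_cons] at h
    have h1 : l1 ++ a :: rest = (l1 ++ [a]) ++ rest := by simp
    rw [h1, ih (l1 ++ [a]) h.2]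
    have hd : PySem.List.dedup (l1 ++ [a]) =
        PySem.List.dedup l1 ++ if a ∈ l1 then [] else [a] := by
      have ha : PySem.List.dedup (l1 ++ [a]) = PySem.Set.add (PySem.List.dedup l1) a := by
        simp [PySem.List.dedup, PySem.Set.ofList, List.foldl_append]
      rw [ha]
      by_cases hm : a ∈ l1
      · simp [PySem.Set.add, hm]
      · simp [PySem.Set.add, hm]

    rw [hd]
    have hf : rest.filter (fun x => decide (x ∉ l1 ++ [a])) =
        rest.filter (fun x => decide (x ∉ l1)) := by
      refine List.filter_congr (fun x hx => ?_)
      have hxa : x ≠ a := fun he => h.1 (he ▸ hx)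
      simp [hxa]
    rw [hf]
    by_cases hm : a ∈ l1 <;> simp [hm]


lemma get?_mk_none {ν : Type} (l : List (String × ν)) (k : String)
    (h : k ∉ l.map Prod.fst) : (PySem.Dict.mk l).get? k = none := by
  simp only [PySem.Dict.get?, Option.map_eq_none_iff, List.find?_eq_none]
  intro p hp
  simp only [beq_iff_eq]
  intro he
  exact h (he ▸ List.mem_map_of_mem hp)

lemma contains_eq_decide {ν : Type} (d : PySem.Dict String ν) (k : String) :
    d.contains k = decide (k ∈ d.items.map Prod.fst) := by
  by_cases hm : k ∈ d.items.map Prod.fst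
  · simp [hm, (contains_iff_mem d k).mpr hm]
  · simp only [hm, decide_false]
    rcases hcc : d.contains k with _ | _
    · rfl
    · exact absurd ((contains_iff_mem d k).mp hcc) hm

lemma collect_fst_sub (nd : List (String × List (String × Int))) (ik a : String)
    (h : a ∈ (pvCollect nd ik).map Prod.fst) : a ∈ nd.map Prod.fst := by
  simp only [pvCollect, List.map_filterMap, List.mem_filterMap] at h
  obtain ⟨p, hp, hv⟩ := h
  rcases hg : (PySem.Dict.mk p.2).get? ik with _ | v <;> simp [hg] at hv
  exact hv ▸ List.mem_map_of_mem hp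

lemma collect_nil (nd : List (String × List (String × Int))) (ik : String)
    (h : ik ∉ pvFlatKeys nd) : pvCollect nd ik = [] := by
  simp only [pvCollect, List.filterMap_eq_nil_iff]
  intro p hp
  rw [get?_mk_none]
  · rfl
  · intro hmem
    exact h (List.mem_flatMap.mpr ⟨p, hp, hmem⟩)

lemma collect_append (pre : List (String × List (String × Int)))
    (x : String × List (String × Int)) (ik : String) :
    pvCollect (pre ++ [x]) ik = pvCollect pre ik ++
      (match (PySem.Dict.mk x.2).get? ik with
       | some v => [(x.1, v)] | none => []) := by
  simp only [pvCollect, List.filterMap_append, List.filterMap_cons, List.filterMap_nil]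
  rcases hg : (PySem.Dict.mk x.2).get? ik with _ | v <;> simp


lemma entry_eq_of_fst_eq {ν : Type} (d : PySem.Dict String ν) (r r0 : String × ν)
    (hr : r ∈ d.items) (hr0 : r0 ∈ d.items) (hk : r.1 = r0.1)
    (hnd : (d.items.map Prod.fst).Nodup) : r = r0 := by
  have h1 := get?_eq_of_mem_nodup d r hr hnd
  have h2 := get?_eq_of_mem_nodup d r0 hr0 hnd
  rw [hk, h2] at h1
  exact Prod.ext hk (Option.some.inj h1).symm

-- how one pass over idict updates an existing entry / creates a new one
def pvUpd (ok : String) (idict : List (String × Int))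
    (r : String × PySem.Dict String Int) : String × PySem.Dict String Int :=
  (r.1, match (PySem.Dict.mk idict).get? r.1 with
        | some v => PySem.Dict.mk (r.2.items ++ [(ok, v)])
        | none => r.2)

def pvNew (ok : String) (q : String × Int) : String × PySem.Dict String Int :=
  (q.1, PySem.Dict.mk [(ok, q.2)])

-- characterization of A's inner loop over one inner dict
lemma innerFold_items (ok : String) (idict : List (String × Int))
    (sw : PySem.Dict String (PySem.Dict String Int))
    (hnd : (idict.map Prod.fst).Nodup)
    (hkeys : (sw.items.map Prod.fst).Nodup)
    (hok : ∀ r ∈ sw.items, r.1 ∈ idict.map Prod.fst → ok ∉ r.2.items.map Prod.fst) :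
    (idict.foldl (pvInnerStep ok) sw).items =
      sw.items.map (pvUpd ok idict) ++
      (idict.filter (fun q => !(sw.contains q.1))).map (pvNew ok) := by
  induction idict generalizing sw with
  | nil =>
    have h0 : ∀ r ∈ sw.items, pvUpd ok [] r = r := by
      intro r _; simp [pvUpd, PySem.Dict.get?]
    simp [List.map_congr_left h0]
  | cons q rest ih =>
    obtain ⟨k0, v0⟩ := q
    simp only [List.map_cons, List.nodup_cons] at hnd
    obtain ⟨hk0, hndr⟩ := hnd
    rw [List.foldl_cons]
    have hupd_ne : ∀ r : String × PySem.Dict String Int, r.1 ≠ k0 →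
        pvUpd ok ((k0, v0) :: rest) r = pvUpd ok rest r := by
      intro r hr
      have hg : (PySem.Dict.mk ((k0, v0) :: rest)).get? r.1 = (PySem.Dict.mk rest).get? r.1 := by
        simp [PySem.Dict.get?, Ne.symm hr]
      simp [pvUpd, hg]
    rcases hc : sw.contains k0 with _ | _
    case false =>
      have hk0mem : k0 ∉ sw.items.map Prod.fst := fun hm => by
        rw [(contains_iff_mem sw k0).mpr hm] at hc; cases hc
      have hins : (sw.insert k0 PySem.Dict.empty).items = sw.items ++ [(k0, PySem.Dict.empty)] :=
        insert_items_of_not_contains sw k0 _ hc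
      have hnd' : ((sw.insert k0 PySem.Dict.empty).items.map Prod.fst).Nodup := by
        rw [hins, List.map_append]
        exact hkeys.append (List.nodup_singleton _) (by simpa using hk0mem)
      have hget : (sw.insert k0 PySem.Dict.empty).get? k0 = some PySem.Dict.empty := by
        have hm : ((k0, PySem.Dict.empty) : String × PySem.Dict String Int)
            ∈ (sw.insert k0 PySem.Dict.empty).items := by
          rw [hins]; exact List.mem_append_right _ (by simp)
        exact get?_eq_of_mem_nodup _ _ hm hnd'
      have hstep : (pvInnerStep ok sw (k0, v0)).items
          = sw.items ++ [(k0, PySem.Dict.mk [(ok, v0)])] := by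
        simp only [pvInnerStep, hc, Bool.not_false, if_true]
        simp only [PySem.Dict.modify, PySem.Dict.getD, hget, Option.getD_some]
        have hc' : (sw.insert k0 PySem.Dict.empty).contains k0 = true := by
          rw [contains_eq_decide, hins]; simp
        rw [insert_items_of_contains _ _ _ hc', hins, List.map_append]
        have h4 : sw.items.map
            (fun r => if r.1 = k0 then (k0, PySem.Dict.empty.insert ok v0) else r) = sw.items := by
          conv_rhs => rw [← List.map_id sw.items]
          refine List.map_congr_left (fun r hr => ?_)
          have hne : r.1 ≠ k0 := fun he => hk0mem (he ▸ List.mem_map_of_mem hr)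
          simp [hne]
        rw [h4]
        simp [PySem.Dict.insert, PySem.Dict.contains, PySem.Dict.empty]
      have hkeys1 : ((pvInnerStep ok sw (k0, v0)).items.map Prod.fst).Nodup := by
        rw [hstep, List.map_append]
        exact hkeys.append (List.nodup_singleton _) (by simpa using hk0mem)
      have hok1 : ∀ r ∈ (pvInnerStep ok sw (k0, v0)).items,
          r.1 ∈ rest.map Prod.fst → ok ∉ r.2.items.map Prod.fst := by
        rw [hstep]
        intro r hr hrk
        rcases List.mem_append.mp hr with h | h
        · exact hok r h (by simp [hrk])
        · have he : r = (k0, PySem.Dict.mk [(ok, v0)]) := by simpa using h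
          rw [he] at hrk
          exact absurd hrk hk0
      rw [ih _ hndr hkeys1 hok1, hstep, List.map_append]
      have hnewF : [((k0, PySem.Dict.mk [(ok, v0)]) : String × PySem.Dict String Int)].map
          (pvUpd ok rest) = [(k0, PySem.Dict.mk [(ok, v0)])] := by
        simp [pvUpd, get?_mk_none rest k0 hk0]
      have hmapeq : sw.items.map (pvUpd ok rest) = sw.items.map (pvUpd ok ((k0, v0) :: rest)) :=
        List.map_congr_left
          (fun r hr => (hupd_ne r (fun he => hk0mem (he ▸ List.mem_map_of_mem hr))).symm)
      have hfilter : rest.filter (fun q => !((pvInnerStep ok sw (k0, v0)).contains q.1))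
          = rest.filter (fun q => !(sw.contains q.1)) := by
        refine List.filter_congr (fun q hq => ?_)
        have hqk : q.1 ≠ k0 := fun he => hk0 (he ▸ List.mem_map_of_mem hq)
        rw [contains_eq_decide, contains_eq_decide, hstep, List.map_append]
        simp [hqk]
      rw [hnewF, hmapeq, hfilter]
      have hfc : ((k0, v0) :: rest).filter (fun q => !(sw.contains q.1))
          = (k0, v0) :: rest.filter (fun q => !(sw.contains q.1)) := by
        simp [hc]
      rw [hfc, List.map_cons]
      simp [pvNew]
    case true =>
      obtain ⟨r0, hr0mem, hr0k⟩ : ∃ r0 ∈ sw.items, r0.1 = k0 := by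
        have hm := (contains_iff_mem sw k0).mp hc
        simpa [List.mem_map, eq_comm] using hm
      have hget : sw.get? k0 = some r0.2 := hr0k ▸ get?_eq_of_mem_nodup sw r0 hr0mem hkeys
      have hokr0 : ok ∉ r0.2.items.map Prod.fst := hok r0 hr0mem (by simp [hr0k])
      have hinsr0 : r0.2.insert ok v0 = PySem.Dict.mk (r0.2.items ++ [(ok, v0)]) := by
        have hcf : r0.2.contains ok = false := by
          rw [contains_eq_decide]; simp [hokr0]
        apply PySem.Dict.ext
        rw [insert_items_of_not_contains _ _ _ hcf]
      have hstep : (pvInnerStep ok sw (k0, v0)).items = sw.items.map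
          (fun r => if r.1 = k0 then (k0, PySem.Dict.mk (r0.2.items ++ [(ok, v0)])) else r) := by
        simp only [pvInnerStep, hc, Bool.not_true, Bool.false_eq_true, if_false]
        simp only [PySem.Dict.modify, PySem.Dict.getD, hget, Option.getD_some]
        rw [hinsr0, insert_items_of_contains _ _ _ hc]
      have hfst : ∀ r : String × PySem.Dict String Int,
          ((fun r => if r.1 = k0 then (k0, PySem.Dict.mk (r0.2.items ++ [(ok, v0)])) else r) r).1
            = r.1 := by
        intro r; by_cases h : r.1 = k0 <;> simp [h]
      have hkeysstep : (pvInnerStep ok sw (k0, v0)).items.map Prod.fst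
          = sw.items.map Prod.fst := by
        rw [hstep, List.map_map]
        exact List.map_congr_left (fun r _ => hfst r)
      have hkeys1 : ((pvInnerStep ok sw (k0, v0)).items.map Prod.fst).Nodup := by
        rw [hkeysstep]; exact hkeys
      have hok1 : ∀ r ∈ (pvInnerStep ok sw (k0, v0)).items,
          r.1 ∈ rest.map Prod.fst → ok ∉ r.2.items.map Prod.fst := by
        rw [hstep]
        intro r hr hrk
        obtain ⟨r', hr'mem, hr'eq⟩ := List.mem_map.mp hr
        by_cases h : r'.1 = k0
        · have hx : ((if r'.1 = k0 then (k0, PySem.Dict.mk (r0.2.items ++ [(ok, v0)])) else r')).1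
              = k0 := by simp [h]
          rw [← hr'eq, hx] at hrk
          exact absurd hrk hk0
        · simp only [h, if_false] at hr'eq
          subst hr'eq
          exact hok r' hr'mem (by rw [List.map_cons]; exact List.mem_cons_of_mem _ hrk)
      rw [ih _ hndr hkeys1 hok1, hstep, List.map_map]
      have hfilter : rest.filter (fun q => !((pvInnerStep ok sw (k0, v0)).contains q.1))
          = rest.filter (fun q => !(sw.contains q.1)) := by
        refine List.filter_congr (fun q _ => ?_)
        rw [contains_eq_decide, contains_eq_decide, hkeysstep]
      have hmain : sw.items.map
            (pvUpd ok rest ∘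
              (fun r => if r.1 = k0 then (k0, PySem.Dict.mk (r0.2.items ++ [(ok, v0)])) else r))
          = sw.items.map (pvUpd ok ((k0, v0) :: rest)) := by
        refine List.map_congr_left (fun r hr => ?_)
        by_cases h : r.1 = k0
        · have hrr0 : r = r0 := entry_eq_of_fst_eq sw r r0 hr hr0mem (h.trans hr0k.symm) hkeys
          have hg : (PySem.Dict.mk ((k0, v0) :: rest)).get? k0 = some v0 := by
            simp [PySem.Dict.get?]
          simp [pvUpd, hrr0, hr0k, get?_mk_none rest k0 hk0, hg]
        · simp only [Function.comp_apply, h, if_false]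
          exact (hupd_ne r h).symm
      rw [hmain, hfilter]
      have hfc : ((k0, v0) :: rest).filter (fun q => !(sw.contains q.1))
          = rest.filter (fun q => !(sw.contains q.1)) := by
        simp [hc]
      rw [hfc]

lemma acc_spec (nd : List (String × List (String × Int)))
    (h1 : (nd.map Prod.fst).Nodup) (h2 : ∀ p ∈ nd, (p.2.map Prod.fst).Nodup) :
    nd.foldl (fun sw p => p.2.foldl (pvInnerStep p.1) sw) PySem.Dict.empty = pvAcc nd := by
  induction nd using List.reverseRecOn with
  | nil => rfl
  | append_singleton pre x ih =>
    have hpre : (pre.map Prod.fst).Nodup ∧ x.1 ∉ pre.map Prod.fst := by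
      rw [List.map_append] at h1
      simp only [List.nodup_append, List.map_cons, List.map_nil] at h1
      exact ⟨h1.1, fun hm => by simpa using h1.2.2 _ hm⟩
    have hndx : (x.2.map Prod.fst).Nodup :=
      h2 x (List.mem_append_right _ (List.mem_singleton.mpr rfl))
    rw [List.foldl_append, List.foldl_cons, List.foldl_nil,
      ih hpre.1 (fun p hp => h2 p (List.mem_append_left _ hp))]
    apply PySem.Dict.ext
    have hitems : (pvAcc pre).items = (PySem.List.dedup (pvFlatKeys pre)).map
        (fun ik => (ik, PySem.Dict.mk (pvCollect pre ik))) := rfl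
    have hkeysacc : (pvAcc pre).items.map Prod.fst = PySem.List.dedup (pvFlatKeys pre) := by
      rw [hitems, List.map_map]; simp [Function.comp_def]
    have hkeys : ((pvAcc pre).items.map Prod.fst).Nodup := by
      rw [hkeysacc]; exact PySem.List.nodup_dedup _
    have hok : ∀ r ∈ (pvAcc pre).items,
        r.1 ∈ x.2.map Prod.fst → x.1 ∉ r.2.items.map Prod.fst := by
      intro r hr _
      rw [hitems] at hr
      obtain ⟨ik, hik, he⟩ := List.mem_map.mp hr
      intro hmem
      rw [← he] at hmem
      exact hpre.2 (collect_fst_sub pre ik x.1 hmem)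
    rw [innerFold_items x.1 x.2 (pvAcc pre) hndx hkeys hok]
    have hfk : pvFlatKeys (pre ++ [x]) = pvFlatKeys pre ++ x.2.map Prod.fst := by
      simp [pvFlatKeys]
    have hsplit : (pvAcc (pre ++ [x])).items
        = (PySem.List.dedup (pvFlatKeys pre)).map
            (fun ik => (ik, PySem.Dict.mk (pvCollect (pre ++ [x]) ik)))
          ++ ((x.2.map Prod.fst).filter (fun a => decide (a ∉ pvFlatKeys pre))).map
            (fun ik => (ik, PySem.Dict.mk (pvCollect (pre ++ [x]) ik))) := by
      show (PySem.List.dedup (pvFlatKeys (pre ++ [x]))).map _ = _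
      rw [hfk, dedup_append _ _ hndx, List.map_append]
    rw [hsplit, hitems]
    congr 1
    · rw [List.map_map]
      refine List.map_congr_left (fun ik hik => ?_)
      cases hg : (PySem.Dict.mk x.2).get? ik <;>
        simp [pvUpd, hg, collect_append pre x ik]
    · have hcont : ∀ q : String × Int,
          (pvAcc pre).contains q.1 = decide (q.1 ∈ pvFlatKeys pre) := by
        intro q; rw [contains_eq_decide, hkeysacc]; simp [PySem.List.dedup]
      have hfm : (x.2.map Prod.fst).filter (fun a => decide (a ∉ pvFlatKeys pre))
          = (x.2.filter (fun q => decide (q.1 ∉ pvFlatKeys pre))).map Prod.fst := by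
        rw [List.filter_map]; rfl
      have hfeq : x.2.filter (fun q => !(pvAcc pre).contains q.1)
          = x.2.filter (fun q => decide (q.1 ∉ pvFlatKeys pre)) := by
        refine List.filter_congr (fun q _ => ?_)
        rw [hcont q]; simp [decide_not]
      rw [hfm, List.map_map, hfeq]
      refine List.map_congr_left (fun q hq => ?_)
      have hqm := List.mem_filter.mp hq
      have hq2 : q.1 ∉ pvFlatKeys pre := by simpa using hqm.2
      have hgq : (PySem.Dict.mk x.2).get? q.1 = some q.2 :=
        get?_eq_of_mem_nodup (PySem.Dict.mk x.2) q hqm.1 hndx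
      simp only [Function.comp_apply, pvNew]
      rw [collect_append pre x q.1, collect_nil pre q.1 hq2]
      simp [hgq]

-- ===== VERDICT (by name: the statement is the Claim_ definition above) =====
theorem swap_dict_levels_spec : Claim_equal_swap_dict_levels := by
  intro nd _ hpre
  show _ = _
  rw [swap_dict_levels, acc_spec nd hpre.1 hpre.2]
  simp [pvAcc, swap_dict_levels_alt, pvFlatKeys, pvCollect, List.map_map, Function.comp]
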